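-- pv_equiv track=rewrite | github.com/Alesyya/tms_qap14_Lukashevich | HW4,5/for.py | nums
-- ===== SOURCE A (Python) =====
-- def nums(num):
--     """ #3 возвращает значение произведения положительных, сумму и количество отрицательных
--         из 10 введенных целых значений
--     """
--     multiply_of_variables = 1
--     count_negative_num = 0
--     sum_negative_num = 0
--     for i in num:
--         if i > 0:
--             multiply_of_variables *= i
--         if i < 0:
--             count_negative_num += 1
--             sum_negative_num += i
--     return multiply_of_variables, count_negative_num, sum_negative_num
-- ===== SOURCE B (Python) =====
-- def nums(num):
--     """Same result as A, computed by filtered passes instead of one fused loop."""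
--     lst = list(num)
--     pos = [x for x in lst if x > 0]
--     neg = [x for x in lst if x < 0]
--     product = 1
--     for x in pos:
--         product *= x
--     return product, len(neg), sum(neg)
-- ===== Notes on version B (the rewrite author's own statement) =====
-- stated objective: simpler
-- what changed: Single fused three-accumulator loop replaced by two filters (positives, negatives) with the product folded over the positives and count/sum read off the negatives list.
import Mathlib
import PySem

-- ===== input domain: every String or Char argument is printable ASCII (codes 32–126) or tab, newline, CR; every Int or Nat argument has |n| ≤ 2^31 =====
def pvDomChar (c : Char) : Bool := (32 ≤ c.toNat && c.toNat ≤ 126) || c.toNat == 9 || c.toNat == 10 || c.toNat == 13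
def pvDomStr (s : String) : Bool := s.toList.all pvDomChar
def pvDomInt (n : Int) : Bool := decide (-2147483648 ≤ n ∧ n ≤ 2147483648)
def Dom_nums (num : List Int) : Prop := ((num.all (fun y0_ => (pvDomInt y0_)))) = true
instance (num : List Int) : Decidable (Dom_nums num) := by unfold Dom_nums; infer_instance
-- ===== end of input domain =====

-- B replaces A's single fused three-accumulator loop by two filtered passes; same cost, plainer shape.

-- ===== PORT A =====
-- One loop carrying (product, count, sum), branches in A's order.
def nums (num : List Int) : Int × Int × Int :=
  num.foldl (fun st i =>
      let m := if i > 0 then st.1 * i else st.1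
      let c := if i < 0 then st.2.1 + 1 else st.2.1
      let s := if i < 0 then st.2.2 + i else st.2.2
      (m, c, s))
    (1, 0, 0)

-- ===== PORT B =====
-- Filter positives and negatives, fold the product, read count/sum off the negatives.
def nums_alt (num : List Int) : Int × Int × Int :=
  let pos := num.filter (fun x => decide (x > 0))
  let neg := num.filter (fun x => decide (x < 0))
  (pos.foldl (fun a x => a * x) 1, (neg.length : Int), neg.foldl (fun a x => a + x) 0)

-- ===== PRECONDITION & SPEC =====
def Spec_nums (num : List Int) (out : Int × Int × Int) : Prop := out = nums_alt num
instance (num : List Int) (out : Int × Int × Int) : Decidable (Spec_nums num out) := by unfold Spec_nums; infer_instance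

-- ===== CLAIM (what is proved, stated in full; the proofs are below) =====
def Claim_equal_nums : Prop := ∀ (num : List Int), Dom_nums num → Spec_nums num (nums num)

-- ===== LEMMAS AND PROOFS =====

theorem foldl_mul_shift (l : List Int) (a : Int) :
    l.foldl (fun a x => a * x) a = a * l.foldl (fun a x => a * x) 1 := by
  induction l generalizing a with
  | nil => simp
  | cons x t ih =>
    simp only [List.foldl_cons]
    rw [ih (a * x), ih (1 * x)]
    ring

theorem foldl_add_shift (l : List Int) (a : Int) :
    l.foldl (fun a x => a + x) a = a + l.foldl (fun a x => a + x) 0 := by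
  induction l generalizing a with
  | nil => simp
  | cons x t ih =>
    simp only [List.foldl_cons]
    rw [ih (a + x), ih (0 + x)]
    ring

theorem nums_key (l : List Int) (m c s : Int) :
    l.foldl (fun st i =>
        let m := if i > 0 then st.1 * i else st.1
        let c := if i < 0 then st.2.1 + 1 else st.2.1
        let s := if i < 0 then st.2.2 + i else st.2.2
        (m, c, s)) (m, c, s)
    = (m * (l.filter (fun x => decide (x > 0))).foldl (fun a x => a * x) 1,
       c + ((l.filter (fun x => decide (x < 0))).length : Int),
       s + (l.filter (fun x => decide (x < 0))).foldl (fun a x => a + x) 0) := by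
  induction l generalizing m c s with
  | nil => simp
  | cons x t ih =>
    simp only [List.foldl_cons, List.filter_cons]
    rw [ih]
    by_cases hpos : x > 0
    · have hneg : ¬ x < 0 := by omega
      simp only [hpos, hneg, decide_true, decide_false, if_true, if_false,
        List.foldl_cons]
      rw [foldl_mul_shift _ (1 * x)]
      refine Prod.ext ?_ (Prod.ext ?_ ?_) <;> simp <;> ring
    · by_cases hneg : x < 0
      · simp only [hpos, hneg, decide_true, decide_false, if_true, if_false,
          List.foldl_cons, List.length_cons]
        rw [foldl_add_shift _ (0 + x)]
        refine Prod.ext ?_ (Prod.ext ?_ ?_) <;> simp <;> push_cast <;> ring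
      · simp [hpos, hneg]

-- ===== VERDICT (by name: the statement is the Claim_ definition above) =====
theorem nums_spec : Claim_equal_nums := by
  intro num _
  unfold Spec_nums nums nums_alt
  rw [nums_key]
  simp
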